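-- pv_equiv track=rewrite | github.com/opnfv/domino | lib/mapper/label.py | map_nodes
-- ===== SOURCE A (Python) =====
-- def map_nodes(site_labels,node_labels):
--   sitemap = dict() #stores mapping
--
--   #for each target find a map of sites
--   for node in node_labels:
--     sitemap[node] = set()
--     for site in site_labels:
--       if node_labels[node].issubset(site_labels[site]):
--         sitemap[node].add(site)
--
--   return sitemap
-- ===== SOURCE B (Python) =====
-- def map_nodes(site_labels, node_labels):
--     # inverted index: label -> set of sites whose label-set contains it
--     index = {}
--     for site, labels in site_labels.items():
--         for lab in labels:
--             index.setdefault(lab, set()).add(site)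
--
--     all_sites = set(site_labels)
--     sitemap = {}
--     for node, labels in node_labels.items():
--         result = set(all_sites)
--         for lab in labels:
--             result &= index.get(lab, set())
--         sitemap[node] = result
--     return sitemap
-- ===== Notes on version B (the rewrite author's own statement) =====
-- stated objective: alternative
-- what changed: Replaces the per-node-per-site subset test with an inverted index from label to posting set of sites, built once, intersecting posting lists per node label.
import Mathlib
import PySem

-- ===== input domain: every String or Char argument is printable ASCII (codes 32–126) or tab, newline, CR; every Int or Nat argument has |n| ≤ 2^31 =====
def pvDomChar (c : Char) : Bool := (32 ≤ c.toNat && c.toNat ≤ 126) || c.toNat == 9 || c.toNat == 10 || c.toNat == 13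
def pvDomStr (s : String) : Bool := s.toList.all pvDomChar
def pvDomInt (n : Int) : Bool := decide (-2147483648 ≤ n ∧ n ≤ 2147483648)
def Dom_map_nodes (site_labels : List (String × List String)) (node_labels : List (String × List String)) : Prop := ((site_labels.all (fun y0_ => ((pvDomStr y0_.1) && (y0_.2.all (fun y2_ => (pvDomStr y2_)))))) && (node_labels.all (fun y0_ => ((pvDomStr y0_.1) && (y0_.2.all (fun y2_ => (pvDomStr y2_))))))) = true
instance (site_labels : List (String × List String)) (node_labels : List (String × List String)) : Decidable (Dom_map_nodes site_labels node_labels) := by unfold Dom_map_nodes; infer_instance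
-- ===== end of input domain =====

-- B replaces A's per-node-per-site subset test with an inverted index (label → posting set of sites)
-- built once, intersecting posting lists per node (objective: alternative algorithm).

-- ===== PORT A =====
-- for node in node_labels: sitemap[node] = set(); for site in site_labels:
--   if node_labels[node].issubset(site_labels[site]): sitemap[node].add(site)
def map_nodes (site_labels : List (String × List String)) (node_labels : List (String × List String)) : List (String × List String) :=
  (node_labels.foldl (fun sitemap node =>
      sitemap.insert node.1 (site_labels.foldl (fun acc site =>
          if PySem.Set.issubset ((PySem.Dict.mk node_labels).getD node.1 PySem.Set.empty)
               ((PySem.Dict.mk site_labels).getD site.1 PySem.Set.empty)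
          then PySem.Set.add acc site.1 else acc) PySem.Set.empty)) PySem.Dict.empty).items

-- ===== PORT B =====
-- index.setdefault(lab, set()).add(site)  ≡  index[lab] = index.get(lab, set()).add(site) (overwrite keeps key position)
def pvIndex (site_labels : List (String × List String)) : PySem.Dict String (List String) :=
  site_labels.foldl (fun idx site =>
    site.2.foldl (fun idx lab =>
      idx.insert lab (PySem.Set.add (idx.getD lab PySem.Set.empty) site.1)) idx) PySem.Dict.empty

-- result = set(all_sites); for lab in labels: result &= index.get(lab, set()); sitemap[node] = result
def map_nodes_alt (site_labels : List (String × List String)) (node_labels : List (String × List String)) : List (String × List String) :=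
  (node_labels.foldl (fun sitemap node =>
      sitemap.insert node.1 (node.2.foldl (fun res lab =>
          PySem.Set.inter res ((pvIndex site_labels).getD lab PySem.Set.empty))
        (PySem.Set.ofList (site_labels.map Prod.fst)))) PySem.Dict.empty).items

-- ===== PRECONDITION & SPEC =====
-- Pre_ excludes association lists with duplicate keys: those do not represent a Python dict
-- (dict construction collapses duplicates, so the Python programs never see such an input as distinct pairs).
def Pre_map_nodes (site_labels : List (String × List String)) (node_labels : List (String × List String)) : Prop :=
  (site_labels.map Prod.fst).Nodup ∧ (node_labels.map Prod.fst).Nodup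
instance (site_labels : List (String × List String)) (node_labels : List (String × List String)) : Decidable (Pre_map_nodes site_labels node_labels) := by unfold Pre_map_nodes; infer_instance

def pvWitness_map_nodes : (List (String × List String)) × (List (String × List String)) :=
  ([("s1", ["a"]), ("s2", ["a", "b"])], [("n1", ["a"]), ("n2", [])])

def Spec_map_nodes (site_labels : List (String × List String)) (node_labels : List (String × List String)) (out : List (String × List String)) : Prop := out = map_nodes_alt site_labels node_labels
instance (site_labels : List (String × List String)) (node_labels : List (String × List String)) (out : List (String × List String)) : Decidable (Spec_map_nodes site_labels node_labels out) := by unfold Spec_map_nodes; infer_instance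

-- ===== CLAIM (what is proved, stated in full; the proofs are below) =====
def Claim_equal_map_nodes : Prop := ∀ (site_labels : List (String × List String)) (node_labels : List (String × List String)), Dom_map_nodes site_labels node_labels → Pre_map_nodes site_labels node_labels → Spec_map_nodes site_labels node_labels (map_nodes site_labels node_labels)

-- ===== LEMMAS AND PROOFS =====

-- A's inner loop over sites: conditional Set.add of fresh distinct keys appends the filtered keys.
theorem pvA_inner (sl : List (String × List String)) (q : (String × List String) → Bool)
    (acc : List String) (hacc : ∀ site ∈ sl, site.1 ∉ acc) (hnd : (sl.map Prod.fst).Nodup) :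
    sl.foldl (fun acc site => if q site then PySem.Set.add acc site.1 else acc) acc
      = acc ++ (sl.filter q).map Prod.fst := by
  induction sl generalizing acc with
  | nil => simp
  | cons site rest ih =>
    simp only [List.map_cons, List.nodup_cons] at hnd
    by_cases hq : q site
    · simp only [List.foldl_cons, hq, if_pos]
      rw [PySem.Set.add_of_not_mem (hacc site (by simp))]
      rw [ih (acc ++ [site.1]) ?_ hnd.2]
      · simp [hq]
      · intro s hs
        simp only [List.mem_append, List.mem_singleton]
        rintro (h | h)
        · exact hacc s (by simp [hs]) h
        · exact hnd.1 (h ▸ List.mem_map_of_mem hs)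
    · simp only [List.foldl_cons, hq, if_neg, Bool.false_eq_true, not_false_iff]
      rw [ih acc (fun s hs => hacc s (by simp [hs])) hnd.2]
      simp [hq]

-- B's index: one site's inner loop over its labels, effect on one posting list.
theorem pvIdx_inner (labs : List String) (s : String) (idx : PySem.Dict String (List String)) (lab : String) :
    (labs.foldl (fun idx l => idx.insert l (PySem.Set.add (idx.getD l PySem.Set.empty) s)) idx).getD lab PySem.Set.empty
      = if labs.contains lab then PySem.Set.add (idx.getD lab PySem.Set.empty) s
        else idx.getD lab PySem.Set.empty := by
  induction labs generalizing idx with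
  | nil => simp
  | cons l rest ih =>
    simp only [List.foldl_cons, ih, List.contains_cons]
    by_cases hl : lab = l
    · subst hl
      rw [PySem.Dict.getD_insert_self]
      by_cases hr : rest.contains lab
      · rw [if_pos hr, if_pos (by simp), PySem.Set.add_of_mem (by simp [PySem.Set.mem_add])]
      · rw [if_neg hr, if_pos (by simp)]
    · simp only [PySem.Dict.getD_insert_of_ne _ _ _ hl]
      have : (lab == l) = false := by simp [hl]
      simp [this]

-- B's index, generalized over the accumulator dict.
theorem pvIdx_aux (sl : List (String × List String)) (idx : PySem.Dict String (List String))
    (h : ∀ site ∈ sl, ∀ l, site.1 ∉ idx.getD l PySem.Set.empty) (hnd : (sl.map Prod.fst).Nodup) (lab : String) :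
    (sl.foldl (fun idx site => site.2.foldl (fun idx l =>
        idx.insert l (PySem.Set.add (idx.getD l PySem.Set.empty) site.1)) idx) idx).getD lab PySem.Set.empty
      = idx.getD lab PySem.Set.empty ++ (sl.filter (fun site => site.2.contains lab)).map Prod.fst := by
  induction sl generalizing idx with
  | nil => simp
  | cons site rest ih =>
    simp only [List.map_cons, List.nodup_cons] at hnd
    simp only [List.foldl_cons]
    rw [ih _ ?_ hnd.2]
    · rw [pvIdx_inner]
      by_cases hc : site.2.contains lab
      · rw [if_pos hc, PySem.Set.add_of_not_mem (h site (by simp) lab),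
            List.filter_cons_of_pos (by simpa using hc)]
        simp
      · rw [if_neg hc, List.filter_cons_of_neg (by simpa using hc)]
    · intro s hs l hmem
      rw [pvIdx_inner] at hmem
      by_cases hc : site.2.contains l
      · rw [if_pos hc] at hmem
        rcases (PySem.Set.mem_add _ _ _).1 hmem with h' | h'
        · exact h s (by simp [hs]) l h'
        · exact hnd.1 (h' ▸ List.mem_map_of_mem hs)
      · rw [if_neg hc] at hmem
        exact h s (by simp [hs]) l hmem

-- B's index: the posting list of lab is the sites whose label set contains lab, in site order.
theorem pvIdx_getD (sl : List (String × List String)) (hnd : (sl.map Prod.fst).Nodup) (lab : String) :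
    (pvIndex sl).getD lab PySem.Set.empty
      = (sl.filter (fun site => site.2.contains lab)).map Prod.fst := by
  have := pvIdx_aux sl PySem.Dict.empty (by simp) hnd lab
  simpa [pvIndex] using this

-- B's per-node loop: iterated intersection is a single filter by all labels.
theorem pvB_inner (labs : List String) (g : String → List String) (res : List String) :
    labs.foldl (fun res lab => PySem.Set.inter res (g lab)) res
      = res.filter (fun s => labs.all (fun lab => (g lab).contains s)) := by
  induction labs generalizing res with
  | nil => simp
  | cons l rest ih =>
    simp only [List.foldl_cons, ih, List.all_cons]
    show (PySem.Set.inter res (g l)).filter _ = _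
    rw [show PySem.Set.inter res (g l) = res.filter (fun x => (g l).contains x) from rfl,
        List.filter_filter]
    apply List.filter_congr
    intro x hx
    simp [Bool.and_comm]

-- Both outer loops: inserting distinct fresh keys into an empty dict lists the pairs in order.
theorem pvItems (nl : List (String × List String)) (v : (String × List String) → List String)
    (hnd : (nl.map Prod.fst).Nodup) :
    (nl.foldl (fun sitemap node => sitemap.insert node.1 (v node)) PySem.Dict.empty).items
      = nl.map (fun node => (node.1, v node)) := by
  have := PySem.Dict.items_foldl_insert_fresh (l := nl) (k := fun a => a.1) (v := v)
     (d := PySem.Dict.empty) (by simp) (by simpa using hnd)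
  simpa using this

-- Membership in a posting list is label membership, for a site of the (key-distinct) site list.
theorem pvPosting_mem (sl : List (String × List String)) (hnd : (sl.map Prod.fst).Nodup)
    (site : String × List String) (hsite : site ∈ sl) (lab : String) :
    ((sl.filter (fun st => st.2.contains lab)).map Prod.fst).contains site.1 = site.2.contains lab := by
  apply Bool.coe_iff_coe.mp
  simp only [List.contains_iff_mem, List.mem_map, List.mem_filter]
  constructor
  · rintro ⟨st, ⟨hst, hc⟩, he⟩
    rwa [List.inj_on_of_nodup_map hnd hsite hst he.symm]
  · intro hc
    exact ⟨site, ⟨hsite, hc⟩, rfl⟩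

-- ===== VERDICT (by name: the statement is the Claim_ definition above) =====
theorem map_nodes_spec : Claim_equal_map_nodes := by
  intro sl nl _ hpre
  obtain ⟨hs, hn⟩ := hpre
  unfold Spec_map_nodes map_nodes map_nodes_alt
  rw [pvItems nl _ hn, pvItems nl _ hn]
  apply List.map_eq_map_iff.mpr
  intro node hnode
  simp only [Prod.mk.injEq, true_and]
  simp only [PySem.Dict.getD_of_mem_items (d := PySem.Dict.mk nl) (Multiset.mem_coe.mp hnode) (by simpa using hn)]
  rw [pvA_inner sl _ PySem.Set.empty (by simp [PySem.Set.empty]) hs]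
  rw [pvB_inner node.2 (fun lab => (pvIndex sl).getD lab PySem.Set.empty)
        (PySem.Set.ofList (sl.map Prod.fst))]
  rw [PySem.Set.ofList_eq_self_of_nodup (xs := sl.map Prod.fst) hs]
  simp only [pvIdx_getD sl hs]
  rw [show (PySem.Set.empty : List String) = [] from rfl, List.nil_append]
  rw [List.filter_map]
  have : ((fun s => node.2.all fun lab => ((sl.filter (fun site => site.2.contains lab)).map Prod.fst).contains s) ∘ Prod.fst)
       = fun site : String × List String => node.2.all fun lab => ((sl.filter (fun st => st.2.contains lab)).map Prod.fst).contains site.1 := rfl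
  rw [this]
  apply congrArg (List.map Prod.fst)
  apply List.filter_congr
  intro site hsite
  rw [PySem.Dict.getD_of_mem_items (d := PySem.Dict.mk sl) (Multiset.mem_coe.mp hsite) (by simpa using hs)]
  apply Bool.coe_iff_coe.mp
  simp only [PySem.Set.issubset_iff, List.all_eq_true]
  constructor
  · intro h lab hlab
    rw [pvPosting_mem sl hs site hsite lab]
    simpa using h lab hlab
  · intro h lab hlab
    have := h lab hlab
    rw [pvPosting_mem sl hs site hsite lab] at this
    simpa using this
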